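-- pv_equiv track=rewrite | github.com/movidius/volumetric_accelerator_toolkit | binutils.py | xyz_from_sparse_index
-- ===== SOURCE A (Python) =====
-- def xyz_from_sparse_index(indexes):
--     """Generate coordinates from sparse index."""
--     x, y, z, = 0, 0, 0
--     for level, index in enumerate(indexes):
--         mult = pow(4, ((len(indexes) - 1) - level))
--         x += (index % 4) * mult
--         y += (index % 16 // 4) * mult
--         z += (index // 16) * mult
--     return (x, y, z)
-- ===== SOURCE B (Python) =====
-- def xyz_from_sparse_index(indexes):
--     """Generate coordinates from sparse index."""
--     x, y, z = 0, 0, 0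
--     for index in indexes:
--         x = x * 4 + index % 4
--         y = y * 4 + index % 16 // 4
--         z = z * 4 + index // 16
--     return (x, y, z)
-- ===== Notes on version B (the rewrite author's own statement) =====
-- stated objective: faster
-- what changed: Replaces the per-position power-weight summation (pow(4, len-1-level) recomputed from len(indexes) each iteration via enumerate) with Horner's method: three running accumulators multiplied by 4 each step, eliminating the bignum pow entirely.
import Mathlib
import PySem

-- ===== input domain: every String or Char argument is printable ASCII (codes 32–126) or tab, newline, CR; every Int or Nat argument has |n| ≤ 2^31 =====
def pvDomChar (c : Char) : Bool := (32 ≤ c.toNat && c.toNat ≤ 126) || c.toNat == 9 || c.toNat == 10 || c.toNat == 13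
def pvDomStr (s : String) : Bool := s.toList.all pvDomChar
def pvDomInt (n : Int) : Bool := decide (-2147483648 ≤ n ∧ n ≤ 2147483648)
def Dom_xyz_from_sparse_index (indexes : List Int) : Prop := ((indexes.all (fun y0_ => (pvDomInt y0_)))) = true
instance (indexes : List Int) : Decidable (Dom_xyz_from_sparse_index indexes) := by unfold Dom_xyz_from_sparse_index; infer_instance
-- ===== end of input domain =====

-- B replaces A's explicit power-weight summation (pow(4, len-1-level) per position) with Horner's method on three running accumulators; objective: simpler.


-- ===== PORT A =====
-- loop body of A: mult = 4 ** ((len(indexes) - 1) - level); x += (index % 4) * mult; …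
def pvStepA (n : Nat) (s : Int × Int × Int) (p : Int × Int) : Int × Int × Int :=
  let mult : Int := (4 : Int) ^ ((n - 1) - p.1.toNat)
  (s.1 + PySem.Int.mod p.2 4 * mult,
   s.2.1 + PySem.Int.floordiv (PySem.Int.mod p.2 16) 4 * mult,
   s.2.2 + PySem.Int.floordiv p.2 16 * mult)

def xyz_from_sparse_index (indexes : List Int) : Int × Int × Int :=
  (PySem.List.enumerate indexes 0).foldl (pvStepA indexes.length) (0, 0, 0)

-- ===== PORT B =====
-- loop body of B: x = x*4 + index % 4; y = y*4 + index % 16 // 4; z = z*4 + index // 16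
def pvStepB (s : Int × Int × Int) (i : Int) : Int × Int × Int :=
  (s.1 * 4 + PySem.Int.mod i 4,
   s.2.1 * 4 + PySem.Int.floordiv (PySem.Int.mod i 16) 4,
   s.2.2 * 4 + PySem.Int.floordiv i 16)

def xyz_from_sparse_index_alt (indexes : List Int) : Int × Int × Int :=
  indexes.foldl pvStepB (0, 0, 0)

-- ===== PRECONDITION & SPEC =====
def Spec_xyz_from_sparse_index (indexes : List Int) (out : Int × Int × Int) : Prop := out = xyz_from_sparse_index_alt indexes
instance (indexes : List Int) (out : Int × Int × Int) : Decidable (Spec_xyz_from_sparse_index indexes out) := by unfold Spec_xyz_from_sparse_index; infer_instance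

-- ===== CLAIM (what is proved, stated in full; the proofs are below) =====
def Claim_equal_xyz_from_sparse_index : Prop := ∀ (indexes : List Int), Dom_xyz_from_sparse_index indexes → Spec_xyz_from_sparse_index indexes (xyz_from_sparse_index indexes)

-- ===== LEMMAS AND PROOFS =====

-- Horner fold from an arbitrary accumulator = accumulator scaled by 4^len plus the fold from zero.
theorem pvB_shift (t : List Int) : ∀ (s : Int × Int × Int),
    t.foldl pvStepB s =
      (s.1 * 4 ^ t.length + (t.foldl pvStepB (0, 0, 0)).1,
       s.2.1 * 4 ^ t.length + (t.foldl pvStepB (0, 0, 0)).2.1,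
       s.2.2 * 4 ^ t.length + (t.foldl pvStepB (0, 0, 0)).2.2) := by
  induction t with
  | nil => intro s; simp
  | cons i t ih =>
    intro s
    simp only [List.foldl_cons, List.length_cons]
    rw [ih (pvStepB s i), ih (pvStepB (0, 0, 0) i)]
    simp only [pvStepB]
    refine Prod.ext ?_ (Prod.ext ?_ ?_) <;> simp <;> ring

-- A's weighted fold over the enumerated suffix equals the accumulator plus B's Horner fold from zero.
theorem pvA_suffix (t : List Int) : ∀ (k : Nat) (a b c : Int),
    (PySem.List.enumerate t (k : Int)).foldl (pvStepA (k + t.length)) (a, b, c) =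
      (a + (t.foldl pvStepB (0, 0, 0)).1,
       b + (t.foldl pvStepB (0, 0, 0)).2.1,
       c + (t.foldl pvStepB (0, 0, 0)).2.2) := by
  induction t with
  | nil => intro k a b c; simp [PySem.List.enumerate_nil]
  | cons i t ih =>
    intro k a b c
    rw [PySem.List.enumerate_cons]
    simp only [List.foldl_cons, List.length_cons]
    have hcast : (k : Int) + 1 = ((k + 1 : Nat) : Int) := by push_cast; ring
    have hlen : k + (t.length + 1) = (k + 1) + t.length := by omega
    rw [hcast, hlen, ih (k + 1) _ _ _]
    simp only [pvStepA, Int.toNat_natCast]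
    have hexp : (k + 1 + t.length - 1) - k = t.length := by omega
    rw [hexp, pvB_shift t (pvStepB (0, 0, 0) i)]
    simp only [pvStepB]
    refine Prod.ext ?_ (Prod.ext ?_ ?_) <;> simp <;> ring

-- ===== VERDICT (by name: the statement is the Claim_ definition above) =====
theorem xyz_from_sparse_index_spec : Claim_equal_xyz_from_sparse_index := by
  intro indexes _
  unfold Spec_xyz_from_sparse_index xyz_from_sparse_index xyz_from_sparse_index_alt
  have h := pvA_suffix indexes 0 0 0 0
  simpa using h
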